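-- pv_equiv track=rewrite | github.com/Dylouwu/TAMACONTEST | test_9/E.py | dfs
-- ===== SOURCE A (Python) =====
-- def dfs(ladder, node, visited):# Depth First Search from ChatGPT
--     stack = [node]
--     max_value = node
--
--     while stack:
--         current = stack.pop()
--         if current in visited:
--             continue
--         visited.add(current)
--         max_value = max(max_value, current)
--         if current in ladder:
--             for neighbor in ladder[current]:
--                 if neighbor not in visited:
--                     stack.append(neighbor)
--
--     return max_value
-- ===== SOURCE B (Python) =====
-- def dfs(ladder, node, visited):
--     max_value = node
--     if node not in visited:
--         visited.add(node)
--         for neighbor in ladder.get(node, []):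
--             if neighbor not in visited:
--                 max_value = max(max_value, dfs(ladder, neighbor, visited))
--     return max_value
-- ===== Notes on version B (the rewrite author's own statement) =====
-- stated objective: simpler
-- what changed: Replaced the explicit-stack while loop (push unvisited neighbors, pop, track max) by a plain recursive DFS that folds max over recursive calls on unvisited neighbors, sharing the same mutable visited set.
import Mathlib
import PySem

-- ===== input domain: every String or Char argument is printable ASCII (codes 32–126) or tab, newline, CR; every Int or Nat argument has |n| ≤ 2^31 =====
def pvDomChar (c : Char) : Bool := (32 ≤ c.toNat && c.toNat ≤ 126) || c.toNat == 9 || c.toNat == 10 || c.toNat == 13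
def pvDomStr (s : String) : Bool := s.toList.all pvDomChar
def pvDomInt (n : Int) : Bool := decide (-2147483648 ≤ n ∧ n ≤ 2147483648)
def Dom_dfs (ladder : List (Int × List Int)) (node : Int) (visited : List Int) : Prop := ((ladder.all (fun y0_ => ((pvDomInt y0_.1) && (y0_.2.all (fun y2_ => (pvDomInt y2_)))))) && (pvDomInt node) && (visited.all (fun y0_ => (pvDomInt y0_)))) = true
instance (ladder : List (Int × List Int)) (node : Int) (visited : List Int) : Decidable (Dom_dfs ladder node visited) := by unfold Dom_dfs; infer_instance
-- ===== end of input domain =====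

-- B replaces A's explicit-stack while loop by a recursive DFS folding max over recursive
-- calls on unvisited neighbors (objective: simpler). Both Pythons mutate the shared
-- `visited` set identically; the equivalence proved here is about the RETURN value.
-- Both loops are ported with a fuel argument that provably suffices (a totality device only).

-- ===== PORT A =====
-- A pops from the END of its Python stack; the port keeps the stack reversed (push/pop at
-- the head), which is the same sequence of popped values. The loop state is
-- (stack, visited, max_value); fuel = 1 + total length of all neighbor lists bounds the
-- number of iterations (proved below), so the 0-fuel arm is never reached from `dfs`.
def dfsLoop (lad : PySem.Dict Int (List Int)) : Nat → List Int → PySem.Set Int → Int → Int × List Int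
  | _, [], v, m => (m, v)
  | 0, _ :: _, v, m => (m, v)
  | fuel+1, c :: rest, v, m =>
      if PySem.Set.contains v c then
        dfsLoop lad fuel rest v m
      else
        let v2 := PySem.Set.add v c
        let m2 := max m c
        let stack2 :=
          match PySem.Dict.get? lad c with
          | none => rest
          | some ns => (ns.filter (fun nb => !(PySem.Set.contains v2 nb))).reverse ++ rest
        dfsLoop lad fuel stack2 v2 m2

def dfs (ladder : List (Int × List Int)) (node : Int) (visited : List Int) : Int :=
  (dfsLoop (PySem.Dict.mk ladder) (1 + (ladder.map (fun p => p.2.length)).sum) [node] visited node).1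

-- ===== PORT B =====
-- Recursive DFS (Source B): max_value = node; if node unvisited, mark it and fold
-- max(max_value, dfs(neighbor)) over its not-yet-visited neighbors, threading the visited
-- set. Returns (max_value, visited). fuel = 2 + total length of all neighbor lists bounds
-- the recursion depth (proved below), so the 0-fuel arm is never reached from `dfs_alt`.
def dfsRec (lad : PySem.Dict Int (List Int)) : Nat → Int → PySem.Set Int → Int × List Int
  | 0, node, v => (node, v)
  | fuel+1, node, v =>
      if PySem.Set.contains v node then (node, v)
      else
        (PySem.Dict.getD lad node []).foldl
          (fun st nb =>
            if PySem.Set.contains st.2 nb then st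
            else (max st.1 (dfsRec lad fuel nb st.2).1, (dfsRec lad fuel nb st.2).2))
          (node, PySem.Set.add v node)

def dfs_alt (ladder : List (Int × List Int)) (node : Int) (visited : List Int) : Int :=
  (dfsRec (PySem.Dict.mk ladder) (2 + (ladder.map (fun p => p.2.length)).sum) node visited).1

-- ===== PRECONDITION & SPEC =====
def Spec_dfs (ladder : List (Int × List Int)) (node : Int) (visited : List Int) (out : Int) : Prop := out = dfs_alt ladder node visited
instance (ladder : List (Int × List Int)) (node : Int) (visited : List Int) (out : Int) : Decidable (Spec_dfs ladder node visited out) := by unfold Spec_dfs; infer_instance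

-- ===== CLAIM (what is proved, stated in full; the proofs are below) =====
def Claim_equal_dfs : Prop := ∀ (ladder : List (Int × List Int)) (node : Int) (visited : List Int), Dom_dfs ladder node visited → Spec_dfs ladder node visited (dfs ladder node visited)

-- ===== LEMMAS AND PROOFS =====

-- x is reachable from c along edges of `lad`, through nodes avoiding `v`.
inductive RA (lad : PySem.Dict Int (List Int)) (v : List Int) (c : Int) : Int → Prop
  | refl : c ∉ v → RA lad v c c
  | step {x y : Int} : RA lad v c x → y ∈ lad.getD x [] → y ∉ v → RA lad v c y

theorem RA_not_mem {lad : PySem.Dict Int (List Int)} {v : List Int} {c x : Int}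
    (h : RA lad v c x) : x ∉ v := by
  cases h with
  | refl h => exact h
  | step _ _ h => exact h

theorem RA_mono {lad : PySem.Dict Int (List Int)} {v w : List Int} {c x : Int}
    (hvw : ∀ z, z ∈ v → z ∈ w) (h : RA lad w c x) : RA lad v c x := by
  induction h with
  | refl h => exact RA.refl (fun hc => h (hvw _ hc))
  | step _ hy hnv ih => exact RA.step ih hy (fun hc => hnv (hvw _ hc))

theorem RA_start_not_mem {lad : PySem.Dict Int (List Int)} {v : List Int} {c x : Int}
    (h : RA lad v c x) : c ∉ v := by
  induction h with
  | refl h => exact h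
  | step _ _ _ ih => exact ih

theorem RA_trans {lad : PySem.Dict Int (List Int)} {v : List Int} {a b x : Int}
    (hab : RA lad v a b) (hbx : RA lad v b x) : RA lad v a x := by
  induction hbx with
  | refl _ => exact hab
  | step _ hy hnv ih => exact RA.step ih hy hnv

-- completeness from closure: a set containing c and closed under edges out of its
-- fresh (∉ v) elements contains everything RA-reachable from c.
theorem RA_closed {lad : PySem.Dict Int (List Int)} {v V : List Int} {c : Int}
    (hc : c ∈ V) (hcl : ∀ x, x ∈ V → x ∉ v → ∀ y ∈ lad.getD x [], y ∈ V) :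
    ∀ x, RA lad v c x → x ∈ V := by
  intro x h
  induction h with
  | refl _ => exact hc
  | @step x y hx hy _ ih => exact hcl x ih (RA_not_mem hx) y hy

-- potential: total length of neighbor lists of yet-unvisited keys (fuel bookkeeping for A)
def potA (lad : PySem.Dict Int (List Int)) (v : List Int) : Nat :=
  ∑ k ∈ (lad.keys.toFinset \ v.toFinset), (lad.getD k []).length

theorem potA_le_of_subset (lad : PySem.Dict Int (List Int)) {v w : List Int}
    (h : ∀ z, z ∈ v → z ∈ w) : potA lad w ≤ potA lad v := by
  apply Finset.sum_le_sum_of_subset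
  intro x hx
  simp only [Finset.mem_sdiff, List.mem_toFinset] at hx ⊢
  exact ⟨hx.1, fun hv => hx.2 (h x hv)⟩

theorem potA_add (lad : PySem.Dict Int (List Int)) {v : List Int} {c : Int}
    (hk : c ∈ lad.keys) (hc : c ∉ v) :
    potA lad v = (lad.getD c []).length + potA lad (PySem.Set.add v c) := by
  unfold potA
  rw [PySem.Set.add_of_not_mem hc]
  have h1 : (v ++ [c]).toFinset = insert c v.toFinset := by
    simp [List.toFinset_append]
  rw [h1, Finset.sdiff_insert]
  have hcm : c ∈ lad.keys.toFinset \ v.toFinset := by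
    simp only [Finset.mem_sdiff, List.mem_toFinset]; exact ⟨hk, hc⟩
  rw [← Finset.add_sum_erase _ _ hcm]

theorem potA_nil_le_total (ladder : List (Int × List Int)) :
    potA (PySem.Dict.mk ladder) [] ≤ (ladder.map (fun p => p.2.length)).sum := by
  induction ladder with
  | nil => simp [potA, PySem.Dict.keys]
  | cons p rest ih =>
    obtain ⟨k, vs⟩ := p
    unfold potA at ih ⊢
    simp only [List.toFinset_nil, Finset.sdiff_empty] at ih ⊢
    have hkeys : (PySem.Dict.mk ((k, vs) :: rest)).keys.toFinset
        = insert k (PySem.Dict.mk rest).keys.toFinset := by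
      simp [PySem.Dict.keys]
    rw [hkeys]
    have hkmem : k ∈ insert k (PySem.Dict.mk rest).keys.toFinset := Finset.mem_insert_self _ _
    rw [← Finset.add_sum_erase _ _ hkmem, Finset.erase_insert_eq_erase]
    have hgk : (PySem.Dict.mk ((k, vs) :: rest)).getD k [] = vs := by
      rw [PySem.Dict.getD_eq_get?_getD, PySem.Dict.get?_mk_cons]; simp
    have hcong : ∑ x ∈ (PySem.Dict.mk rest).keys.toFinset.erase k,
        ((PySem.Dict.mk ((k, vs) :: rest)).getD x []).length
        = ∑ x ∈ (PySem.Dict.mk rest).keys.toFinset.erase k,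
        ((PySem.Dict.mk rest).getD x []).length := by
      apply Finset.sum_congr rfl
      intro x hx
      have hxk : ¬ (k == x) := by
        simp only [Finset.mem_erase] at hx
        simp [hx.1.symm]  -- x ≠ k → ¬ k == x
      rw [PySem.Dict.getD_eq_get?_getD, PySem.Dict.get?_mk_cons,
          PySem.Dict.getD_eq_get?_getD]
      simp [hxk]
    rw [hgk, hcong]
    simp only [List.map_cons, List.sum_cons]
    have hle : ∑ x ∈ (PySem.Dict.mk rest).keys.toFinset.erase k,
        ((PySem.Dict.mk rest).getD x []).length
        ≤ ∑ x ∈ (PySem.Dict.mk rest).keys.toFinset,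
        ((PySem.Dict.mk rest).getD x []).length :=
      Finset.sum_le_sum_of_subset (Finset.erase_subset _ _)
    omega

theorem potA_le_total (ladder : List (Int × List Int)) (v : List Int) :
    potA (PySem.Dict.mk ladder) v ≤ (ladder.map (fun p => p.2.length)).sum :=
  (potA_le_of_subset _ (by intro z hz; cases hz)).trans (potA_nil_le_total ladder)

def valsF (lad : PySem.Dict Int (List Int)) : Finset Int := lad.values.flatten.toFinset

theorem mem_getD_mem_valsF {lad : PySem.Dict Int (List Int)} {x y : Int}
    (h : y ∈ lad.getD x []) : y ∈ valsF lad := by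
  rw [PySem.Dict.getD_eq_get?_getD] at h
  cases hg : lad.get? x with
  | none => rw [hg] at h; cases h
  | some ns =>
    rw [hg] at h
    simp only [Option.getD_some] at h
    have hit := PySem.Dict.mem_items_of_get?_eq_some lad hg
    have hns : ns ∈ lad.values := by
      simp only [PySem.Dict.values]
      exact List.mem_map.mpr ⟨(x, ns), hit, rfl⟩
    simp only [valsF, List.mem_toFinset]
    exact List.mem_flatten.mpr ⟨ns, hns, h⟩

-- the big invariant for A's loop
theorem loopA_post (lad : PySem.Dict Int (List Int)) :
    ∀ (fuel : Nat) (stack : List Int) (v : PySem.Set Int) (m : Int),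
    stack.length + potA lad v ≤ fuel →
    (∀ x ∈ v, x ∈ (dfsLoop lad fuel stack v m).2) ∧
    (∀ s ∈ stack, s ∈ (dfsLoop lad fuel stack v m).2) ∧
    (∀ x, x ∈ (dfsLoop lad fuel stack v m).2 → x ∉ v →
        (∀ y ∈ lad.getD x [], y ∈ (dfsLoop lad fuel stack v m).2) ∧
        (∃ s ∈ stack, RA lad v s x) ∧ x ≤ (dfsLoop lad fuel stack v m).1) ∧
    ((dfsLoop lad fuel stack v m).1 = m ∨
      ((dfsLoop lad fuel stack v m).1 ∈ (dfsLoop lad fuel stack v m).2 ∧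
        (dfsLoop lad fuel stack v m).1 ∉ v)) ∧
    m ≤ (dfsLoop lad fuel stack v m).1 := by
  intro fuel
  induction fuel with
  | zero =>
    intro stack v m h
    cases stack with
    | nil =>
      simp only [dfsLoop]
      exact ⟨fun x hx => hx, fun s hs => absurd hs (List.not_mem_nil),
        fun x hx hnx => absurd hx hnx, Or.inl trivial, le_refl m⟩
    | cons c rest => simp at h
  | succ f ih =>
    intro stack v m h
    cases stack with
    | nil =>
      simp only [dfsLoop]
      exact ⟨fun x hx => hx, fun s hs => absurd hs (List.not_mem_nil),
        fun x hx hnx => absurd hx hnx, Or.inl trivial, le_refl m⟩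
    | cons c rest =>
      by_cases hc : c ∈ v
      · -- current already visited: skip
        have hcb : PySem.Set.contains v c = true := (PySem.Set.contains_iff v c).mpr hc
        have hred : dfsLoop lad (f + 1) (c :: rest) v m = dfsLoop lad f rest v m := by
          simp only [dfsLoop, hcb, if_true]
        rw [hred]
        have h' : rest.length + potA lad v ≤ f := by
          simp only [List.length_cons] at h; omega
        obtain ⟨A2, B2, C2, D2, E2⟩ := ih rest v m h'
        refine ⟨A2, ?_, ?_, D2, E2⟩
        · intro s hs
          rcases List.mem_cons.mp hs with rfl | hs
          · exact A2 s hc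
          · exact B2 s hs
        · intro x hx hnx
          obtain ⟨hcl, ⟨s, hs, hra⟩, hb⟩ := C2 x hx hnx
          exact ⟨hcl, ⟨s, List.mem_cons_of_mem _ hs, hra⟩, hb⟩
      · -- current freshly visited
        have hcb : PySem.Set.contains v c = false := by
          rw [← Bool.not_eq_true, PySem.Set.contains_iff]; exact hc
        have hvv2 : ∀ z, z ∈ v → z ∈ PySem.Set.add v c := fun z hz =>
          (PySem.Set.mem_add v c z).mpr (Or.inl hz)
        have hcv2 : c ∈ PySem.Set.add v c := (PySem.Set.mem_add v c c).mpr (Or.inr rfl)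
        cases hg : PySem.Dict.get? lad c with
        | none =>
          have hred : dfsLoop lad (f + 1) (c :: rest) v m
              = dfsLoop lad f rest (PySem.Set.add v c) (max m c) := by
            simp only [dfsLoop, hcb, Bool.false_eq_true, if_false, hg]
          rw [hred]
          have hgd : lad.getD c [] = [] := by
            rw [PySem.Dict.getD_eq_get?_getD, hg]; rfl
          have hpot : potA lad (PySem.Set.add v c) ≤ potA lad v := potA_le_of_subset lad hvv2
          have h' : rest.length + potA lad (PySem.Set.add v c) ≤ f := by
            simp only [List.length_cons] at h; omega
          obtain ⟨A2, B2, C2, D2, E2⟩ := ih rest (PySem.Set.add v c) (max m c) h'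
          refine ⟨fun x hx => A2 x (hvv2 x hx), ?_, ?_, ?_, le_trans (le_max_left m c) E2⟩
          · intro s hs
            rcases List.mem_cons.mp hs with rfl | hs
            · exact A2 s hcv2
            · exact B2 s hs
          · intro x hx hnx
            by_cases hxc : x = c
            · subst hxc
              refine ⟨?_, ⟨x, List.mem_cons_self, RA.refl hc⟩, le_trans (le_max_right m x) E2⟩
              intro y hy; rw [hgd] at hy; cases hy
            · have hnx2 : x ∉ PySem.Set.add v c := fun hx2 =>
                ((PySem.Set.mem_add v c x).mp hx2).elim hnx hxc
              obtain ⟨hcl, ⟨s, hs, hra⟩, hb⟩ := C2 x hx hnx2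
              exact ⟨hcl, ⟨s, List.mem_cons_of_mem _ hs, RA_mono hvv2 hra⟩, hb⟩
          · rcases D2 with hm | ⟨hmem, hnv2⟩
            · rcases max_choice m c with hmc | hmc
              · exact Or.inl (hm.trans hmc)
              · have hout := hm.trans hmc
                refine Or.inr ?_
                rw [hout]
                exact ⟨A2 c hcv2, hc⟩
            · exact Or.inr ⟨hmem, fun hv => hnv2 (hvv2 _ hv)⟩
        | some ns =>
          have hred : dfsLoop lad (f + 1) (c :: rest) v m
              = dfsLoop lad f
                  ((ns.filter (fun nb => !(PySem.Set.contains (PySem.Set.add v c) nb))).reverse ++ rest)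
                  (PySem.Set.add v c) (max m c) := by
            simp only [dfsLoop, hcb, Bool.false_eq_true, if_false, hg]
          rw [hred]
          set stack2 := (ns.filter (fun nb => !(PySem.Set.contains (PySem.Set.add v c) nb))).reverse ++ rest with hs2
          have hgd : lad.getD c [] = ns := by
            rw [PySem.Dict.getD_eq_get?_getD, hg]; rfl
          have hck : c ∈ lad.keys :=
            PySem.Dict.mem_keys_of_mem_items _ (PySem.Dict.mem_items_of_get?_eq_some lad hg)
          have hpot : potA lad v = ns.length + potA lad (PySem.Set.add v c) := by
            have := potA_add lad hck hc; rw [hgd] at this; exact this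
          have hlen : stack2.length ≤ ns.length + rest.length := by
            simp only [hs2, List.length_append, List.length_reverse]
            have := List.length_filter_le (fun nb => !(PySem.Set.contains (PySem.Set.add v c) nb)) ns
            omega
          have h' : stack2.length + potA lad (PySem.Set.add v c) ≤ f := by
            simp only [List.length_cons] at h; omega
          obtain ⟨A2, B2, C2, D2, E2⟩ := ih stack2 (PySem.Set.add v c) (max m c) h'
          have hfilt : ∀ y ∈ ns, y ∉ PySem.Set.add v c → y ∈ stack2 := by
            intro y hy hny
            apply List.mem_append_left
            apply List.mem_reverse.mpr
            apply List.mem_filter.mpr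
            refine ⟨hy, ?_⟩
            rw [Bool.not_eq_eq_eq_not, Bool.not_true, ← Bool.not_eq_true, PySem.Set.contains_iff]
            exact hny
          refine ⟨fun x hx => A2 x (hvv2 x hx), ?_, ?_, ?_, le_trans (le_max_left m c) E2⟩
          · intro s hs
            rcases List.mem_cons.mp hs with rfl | hs
            · exact A2 s hcv2
            · exact B2 s (List.mem_append_right _ hs)
          · intro x hx hnx
            by_cases hxc : x = c
            · subst hxc
              refine ⟨?_, ⟨x, List.mem_cons_self, RA.refl hc⟩, le_trans (le_max_right m x) E2⟩
              intro y hy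
              rw [hgd] at hy
              by_cases hy2 : y ∈ PySem.Set.add v x
              · exact A2 y hy2
              · exact B2 y (hfilt y hy hy2)
            · have hnx2 : x ∉ PySem.Set.add v c := fun hx2 =>
                ((PySem.Set.mem_add v c x).mp hx2).elim hnx hxc
              obtain ⟨hcl, ⟨s, hs, hra⟩, hb⟩ := C2 x hx hnx2
              refine ⟨hcl, ?_, hb⟩
              rcases List.mem_append.mp hs with hsl | hsr
              · -- s is a freshly pushed neighbor of c
                have hsn := List.mem_filter.mp (List.mem_reverse.mp hsl)
                have hsns : s ∈ ns := hsn.1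
                have hsnv2 : s ∉ PySem.Set.add v c := by
                  have := hsn.2
                  rw [Bool.not_eq_eq_eq_not, Bool.not_true, ← Bool.not_eq_true,
                    PySem.Set.contains_iff] at this
                  exact this
                have hsnv : s ∉ v := fun hsv => hsnv2 (hvv2 _ hsv)
                have hracs : RA lad v c s := RA.step (RA.refl hc) (hgd ▸ hsns) hsnv
                exact ⟨c, List.mem_cons_self, RA_trans hracs (RA_mono hvv2 hra)⟩
              · exact ⟨s, List.mem_cons_of_mem _ hsr, RA_mono hvv2 hra⟩
          · rcases D2 with hm | ⟨hmem, hnv2⟩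
            · rcases max_choice m c with hmc | hmc
              · exact Or.inl (hm.trans hmc)
              · have hout := hm.trans hmc
                refine Or.inr ?_
                rw [hout]
                exact ⟨A2 c hcv2, hc⟩
            · exact Or.inr ⟨hmem, fun hv => hnv2 (hvv2 _ hv)⟩

-- the big invariant for B's recursion
def stepB (lad : PySem.Dict Int (List Int)) (f : Nat) (st : Int × PySem.Set Int) (nb : Int) : Int × PySem.Set Int :=
  if PySem.Set.contains st.2 nb then st
  else (max st.1 (dfsRec lad f nb st.2).1, (dfsRec lad f nb st.2).2)

-- the postcondition of one call of dfsRec (B's invariant)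
def PostB (lad : PySem.Dict Int (List Int)) (f : Nat) (c : Int) (v : PySem.Set Int) : Prop :=
  (∀ x ∈ v, x ∈ (dfsRec lad f c v).2) ∧
  (c ∈ v → dfsRec lad f c v = (c, v)) ∧
  (c ∉ v →
    c ∈ (dfsRec lad f c v).2 ∧
    (∀ x, x ∈ (dfsRec lad f c v).2 → x ∉ v →
      (∀ y ∈ lad.getD x [], y ∈ (dfsRec lad f c v).2) ∧
      RA lad v c x ∧ x ≤ (dfsRec lad f c v).1) ∧
    ((dfsRec lad f c v).1 ∈ (dfsRec lad f c v).2 ∧ (dfsRec lad f c v).1 ∉ v))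

theorem foldB_post (lad : PySem.Dict Int (List Int)) (f : Nat)
    (IH : ∀ (c : Int) (v : PySem.Set Int),
      ((insert c (valsF lad)) \ v.toFinset).card + 1 ≤ f → PostB lad f c v)
    (c : Int) (v : PySem.Set Int) (hc : c ∉ v)
    (hcard : ((insert c (valsF lad)) \ v.toFinset).card ≤ f) :
    ∀ (ns : List Int) (m : Int) (w : PySem.Set Int),
      (∀ nb ∈ ns, nb ∈ valsF lad) →
      (∀ z, z ∈ v → z ∈ w) → c ∈ w →
      (∀ x ∈ w, x ∈ (ns.foldl (stepB lad f) (m, w)).2) ∧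
      (∀ nb ∈ ns, nb ∈ (ns.foldl (stepB lad f) (m, w)).2) ∧
      (∀ x, x ∈ (ns.foldl (stepB lad f) (m, w)).2 → x ∉ w →
        (∀ y ∈ lad.getD x [], y ∈ (ns.foldl (stepB lad f) (m, w)).2) ∧
        (∃ nb ∈ ns, RA lad w nb x) ∧ x ≤ (ns.foldl (stepB lad f) (m, w)).1) ∧
      ((ns.foldl (stepB lad f) (m, w)).1 = m ∨
        ((ns.foldl (stepB lad f) (m, w)).1 ∈ (ns.foldl (stepB lad f) (m, w)).2 ∧
          (ns.foldl (stepB lad f) (m, w)).1 ∉ w)) ∧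
      m ≤ (ns.foldl (stepB lad f) (m, w)).1 := by
  intro ns
  induction ns with
  | nil =>
    intro m w _ _ _
    simp only [List.foldl_nil]
    exact ⟨fun x hx => hx, fun nb hnb => absurd hnb (List.not_mem_nil),
      fun x hx hnx => absurd hx hnx, Or.inl (by trivial), le_refl m⟩
  | cons nb ns' ihl =>
    intro m w hns hvw hcw
    have hnbval : nb ∈ valsF lad := hns nb List.mem_cons_self
    have hns' : ∀ a ∈ ns', a ∈ valsF lad := fun a ha => hns a (List.mem_cons_of_mem _ ha)
    by_cases hnb : nb ∈ w
    · -- neighbor already visited: state unchanged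
      have hred : (nb :: ns').foldl (stepB lad f) (m, w) = ns'.foldl (stepB lad f) (m, w) := by
        rw [List.foldl_cons]
        congr 1
        simp only [stepB, (PySem.Set.contains_iff w nb).mpr hnb, if_true]
      rw [hred]
      obtain ⟨A2, B2, C2, D2, E2⟩ := ihl m w hns' hvw hcw
      refine ⟨A2, ?_, ?_, D2, E2⟩
      · intro a ha
        rcases List.mem_cons.mp ha with rfl | ha
        · exact A2 a hnb
        · exact B2 a ha
      · intro x hx hnx
        obtain ⟨hcl, ⟨nb', hnb', hra⟩, hb⟩ := C2 x hx hnx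
        exact ⟨hcl, ⟨nb', List.mem_cons_of_mem _ hnb', hra⟩, hb⟩
    · -- neighbor unvisited: recursive call
      have hnbb : PySem.Set.contains w nb = false := by
        rw [← Bool.not_eq_true, PySem.Set.contains_iff]; exact hnb
      have hred : (nb :: ns').foldl (stepB lad f) (m, w)
          = ns'.foldl (stepB lad f) (max m (dfsRec lad f nb w).1, (dfsRec lad f nb w).2) := by
        rw [List.foldl_cons]
        congr 1
        simp only [stepB, hnbb, Bool.false_eq_true, if_false]
      rw [hred]
      -- fuel accounting for the child call
      have hcins : c ∈ (insert c (valsF lad)) \ v.toFinset := by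
        simp [hc]
      have hsub : (insert nb (valsF lad)) \ w.toFinset
          ⊆ ((insert c (valsF lad)) \ v.toFinset).erase c := by
        intro x hx
        simp only [Finset.mem_sdiff, Finset.mem_insert, List.mem_toFinset] at hx
        have hxval : x ∈ valsF lad := by
          rcases hx.1 with rfl | hxv
          · exact hnbval
          · exact hxv
        have hxnw : x ∉ w := hx.2
        simp only [Finset.mem_erase, Finset.mem_sdiff, Finset.mem_insert, List.mem_toFinset]
        exact ⟨fun hxc => hxnw (hxc ▸ hcw), Or.inr hxval, fun hxv => hxnw (hvw x hxv)⟩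
      have hcard' : ((insert nb (valsF lad)) \ w.toFinset).card + 1 ≤ f := by
        have h1 := Finset.card_le_card hsub
        have h2 : (((insert c (valsF lad)) \ v.toFinset).erase c).card
            = ((insert c (valsF lad)) \ v.toFinset).card - 1 := Finset.card_erase_of_mem hcins
        have h3 : 0 < ((insert c (valsF lad)) \ v.toFinset).card := Finset.card_pos.mpr ⟨c, hcins⟩
        omega
      obtain ⟨cA, _, cF⟩ := IH nb w hcard'
      obtain ⟨hnbm, hper, hrmem, hrnw⟩ := cF hnb
      obtain ⟨A2, B2, C2, D2, E2⟩ := ihl (max m (dfsRec lad f nb w).1) (dfsRec lad f nb w).2 hns'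
        (fun z hz => cA z (hvw z hz)) (cA c hcw)
      refine ⟨fun x hx => A2 x (cA x hx), ?_, ?_, ?_, le_trans (le_max_left _ _) E2⟩
      · intro a ha
        rcases List.mem_cons.mp ha with rfl | ha
        · exact A2 a hnbm
        · exact B2 a ha
      · intro x hx hnx
        by_cases hxw1 : x ∈ (dfsRec lad f nb w).2
        · obtain ⟨hcl, hra, hb⟩ := hper x hxw1 hnx
          refine ⟨fun y hy => A2 y (hcl y hy), ⟨nb, List.mem_cons_self, hra⟩,
            le_trans hb (le_trans (le_max_right _ _) E2)⟩
        · obtain ⟨hcl, ⟨nb', hnb', hra⟩, hb⟩ := C2 x hx hxw1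
          exact ⟨hcl, ⟨nb', List.mem_cons_of_mem _ hnb',
            RA_mono (fun z hz => cA z hz) hra⟩, hb⟩
      · rcases D2 with hm | ⟨hmem, hnw1⟩
        · rcases max_choice m (dfsRec lad f nb w).1 with hmc | hmc
          · exact Or.inl (hm.trans hmc)
          · have hout := hm.trans hmc
            refine Or.inr ?_
            rw [hout]
            exact ⟨A2 _ hrmem, hrnw⟩
        · exact Or.inr ⟨hmem, fun hxw => hnw1 (cA _ hxw)⟩

theorem recB_post (lad : PySem.Dict Int (List Int)) :
    ∀ (fuel : Nat) (c : Int) (v : PySem.Set Int),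
    ((insert c (valsF lad)) \ v.toFinset).card + 1 ≤ fuel → PostB lad fuel c v := by
  intro fuel
  induction fuel with
  | zero => intro c v h; exact absurd h (by omega)
  | succ f ihf =>
    intro c v hcard
    by_cases hc : c ∈ v
    · have hred : dfsRec lad (f + 1) c v = (c, v) := by
        simp only [dfsRec, (PySem.Set.contains_iff v c).mpr hc, if_true]
      unfold PostB
      rw [hred]
      exact ⟨fun x hx => hx, fun _ => rfl, fun hnc => absurd hc hnc⟩
    · have hcb : PySem.Set.contains v c = false := by
        rw [← Bool.not_eq_true, PySem.Set.contains_iff]; exact hc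
      have hred : dfsRec lad (f + 1) c v
          = (lad.getD c []).foldl (stepB lad f) (c, PySem.Set.add v c) := by
        simp only [dfsRec, hcb, Bool.false_eq_true, if_false]
        rfl
      have hvv2 : ∀ z, z ∈ v → z ∈ PySem.Set.add v c := fun z hz =>
        (PySem.Set.mem_add v c z).mpr (Or.inl hz)
      have hcv2 : c ∈ PySem.Set.add v c := (PySem.Set.mem_add v c c).mpr (Or.inr rfl)
      have hcard' : ((insert c (valsF lad)) \ v.toFinset).card ≤ f := by omega
      obtain ⟨FA, FB, FC, FD, FE⟩ := foldB_post lad f ihf c v hc hcard'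
        (lad.getD c []) c (PySem.Set.add v c)
        (fun nb hnb => mem_getD_mem_valsF hnb) hvv2 hcv2
      unfold PostB
      rw [hred]
      refine ⟨fun x hx => FA x (hvv2 x hx), fun hcv => absurd hcv hc, fun _ => ?_⟩
      refine ⟨FA c hcv2, ?_, ?_⟩
      · intro x hx hnx
        by_cases hxc : x = c
        · subst hxc
          exact ⟨fun y hy => FB y hy, RA.refl hc, FE⟩
        · have hnxw : x ∉ PySem.Set.add v c := fun hxw =>
            ((PySem.Set.mem_add v c x).mp hxw).elim hnx hxc
          obtain ⟨hcl, ⟨nb, hnbm, hra⟩, hb⟩ := FC x hx hnxw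
          have hnbv : nb ∉ v := fun hnbv => (RA_start_not_mem hra) (hvv2 nb hnbv)
          have hracnb : RA lad v c nb := RA.step (RA.refl hc) hnbm hnbv
          exact ⟨hcl, RA_trans hracnb (RA_mono hvv2 hra), hb⟩
      · rcases FD with hm | ⟨hmem, hnw⟩
        · refine ⟨?_, ?_⟩
          · rw [hm]; exact FA c hcv2
          · rw [hm]; exact hc
        · exact ⟨hmem, fun hxv => hnw (hvv2 _ hxv)⟩

-- ===== VERDICT (by name: the statement is the Claim_ definition above) =====
theorem dfs_spec : Claim_equal_dfs := by
  intro ladder node visited _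
  unfold Spec_dfs dfs dfs_alt
  -- A's fuel suffices
  have hfA : ([node] : List Int).length + potA (PySem.Dict.mk ladder) visited
      ≤ 1 + (ladder.map (fun p => p.2.length)).sum := by
    have := potA_le_total ladder visited
    simp only [List.length_cons, List.length_nil]
    omega
  obtain ⟨A1, B1, C1, D1, E1⟩ := loopA_post (PySem.Dict.mk ladder) _ [node] visited node hfA
  -- B's fuel suffices
  have hfB : ((insert node (valsF (PySem.Dict.mk ladder))) \ visited.toFinset).card + 1
      ≤ 2 + (ladder.map (fun p => p.2.length)).sum := by
    have h1 : ((insert node (valsF (PySem.Dict.mk ladder))) \ visited.toFinset).card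
        ≤ (insert node (valsF (PySem.Dict.mk ladder))).card :=
      Finset.card_le_card Finset.sdiff_subset
    have h2 : (insert node (valsF (PySem.Dict.mk ladder))).card
        ≤ (valsF (PySem.Dict.mk ladder)).card + 1 := Finset.card_insert_le _ _
    have h3 : (valsF (PySem.Dict.mk ladder)).card ≤ (ladder.map (fun p => p.2.length)).sum := by
      have h4 := List.toFinset_card_le ((PySem.Dict.mk ladder).values.flatten)
      have h5 : ((PySem.Dict.mk ladder).values.flatten).length
          = (ladder.map (fun p => p.2.length)).sum := by
        simp [PySem.Dict.values, List.length_flatten,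
          Function.comp_def]
      unfold valsF
      omega
    omega
  have hB := recB_post (PySem.Dict.mk ladder) _ node visited hfB
  unfold PostB at hB
  obtain ⟨A2, B2, C2⟩ := hB
  by_cases hnv : node ∈ visited
  · -- node already visited: both return node
    rw [B2 hnv]
    rcases D1 with h | ⟨hmem, hnx⟩
    · exact h
    · exfalso
      obtain ⟨_, ⟨s, hs, hra⟩, _⟩ := C1 _ hmem hnx
      have hsn : s = node := List.mem_singleton.mp hs
      exact RA_start_not_mem hra (hsn ▸ hnv)
  · -- node fresh: both return the max of the RA-reachable set
    obtain ⟨hcm, hper, hrm⟩ := C2 hnv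
    have hAupper : ∀ x, RA (PySem.Dict.mk ladder) visited node x →
        x ≤ (dfsLoop (PySem.Dict.mk ladder) (1 + (ladder.map (fun p => p.2.length)).sum)
          [node] visited node).1 := by
      intro x hx
      have hxin := RA_closed (B1 node List.mem_cons_self)
        (fun z hz hnz => (C1 z hz hnz).1) x hx
      exact (C1 x hxin (RA_not_mem hx)).2.2
    have hArm : RA (PySem.Dict.mk ladder) visited node
        (dfsLoop (PySem.Dict.mk ladder) (1 + (ladder.map (fun p => p.2.length)).sum)
          [node] visited node).1 := by
      rcases D1 with h | ⟨hmem, hnx⟩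
      · rw [h]; exact RA.refl hnv
      · obtain ⟨_, ⟨s, hs, hra⟩, _⟩ := C1 _ hmem hnx
        have hsn : s = node := List.mem_singleton.mp hs
        exact hsn ▸ hra
    have hBupper : ∀ x, RA (PySem.Dict.mk ladder) visited node x →
        x ≤ (dfsRec (PySem.Dict.mk ladder) (2 + (ladder.map (fun p => p.2.length)).sum)
          node visited).1 := by
      intro x hx
      have hxin := RA_closed hcm (fun z hz hnz => (hper z hz hnz).1) x hx
      exact (hper x hxin (RA_not_mem hx)).2.2
    have hBrm := (hper _ hrm.1 hrm.2).2.1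
    exact le_antisymm (hBupper _ hArm) (hAupper _ hBrm)
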